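-- pv_equiv track=rewrite | github.com/sim-mautner/cs1010-21t3 | lectures/06-revision/01-musk-tweets.py | generate_word_map
-- ===== SOURCE A (Python) =====
-- def generate_word_map(tweets):
--     word_map = {}
--     word_map[tuple()] = {}
--
--     for tweet in tweets:
--         prefix = tuple() # (   ,    )
--         for word in tweet.split():
--             # Have we seen the prefix before?
--             if prefix not in word_map:
--                 word_map[prefix] = {}
--             # Prefix is in the map
--             # Is our word, in that prefix dictionary?
--             if word in word_map[prefix]:
--                 word_map[prefix][word] += 1
--             else:
--                 word_map[prefix][word] = 1
--
--             # Update the prefix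
--             # If the prefix was empty --> one word
--             if len(prefix) == 0:
--                 prefix = (word,)
--             elif len(prefix) == 1:
--                 prefix = (prefix[0],word)
--             else: # already had 2 words
--                 prefix = (prefix[1],word)
--
--     return word_map
-- ===== SOURCE B (Python) =====
-- def generate_word_map(tweets):
--     # Phase 1: extract all (prefix, word) transitions, prefix = previous <=2 words.
--     transitions = []
--     for tweet in tweets:
--         words = tweet.split()
--         for i in range(len(words)):
--             transitions.append((tuple(words[max(0, i - 2):i]), words[i]))
--     # Phase 2: aggregate transitions into the nested map (empty prefix seeded).
--     word_map = {(): {}}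
--     for prefix, word in transitions:
--         inner = word_map.setdefault(prefix, {})
--         inner[word] = inner.get(word, 0) + 1
--     return word_map
-- ===== Notes on version B (the rewrite author's own statement) =====
-- stated objective: alternative
-- what changed: B replaces A's single interleaved loop with a running prefix variable by a two-phase pipeline: first build an explicit list of (prefix, word) transitions per tweet via index slices words[max(0,i-2):i], then aggregate that flat list into the nested map seeded with the empty prefix.
import Mathlib
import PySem

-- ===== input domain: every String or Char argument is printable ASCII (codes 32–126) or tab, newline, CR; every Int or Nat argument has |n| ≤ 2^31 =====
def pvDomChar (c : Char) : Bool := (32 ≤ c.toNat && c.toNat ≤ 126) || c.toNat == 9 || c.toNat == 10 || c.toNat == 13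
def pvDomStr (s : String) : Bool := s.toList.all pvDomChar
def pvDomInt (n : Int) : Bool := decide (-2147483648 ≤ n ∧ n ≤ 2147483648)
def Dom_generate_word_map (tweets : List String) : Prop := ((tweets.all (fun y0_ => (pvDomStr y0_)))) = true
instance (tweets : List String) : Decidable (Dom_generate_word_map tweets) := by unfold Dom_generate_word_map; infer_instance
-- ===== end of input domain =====

-- B re-implements the tweet bigram-prefix word-frequency map as a two-phase pipeline
-- (explicit slice-indexed transition list, then one aggregation fold) instead of A's
-- interleaved loop with a running prefix variable; alternative decomposition, same cost.


-- ===== PORT A =====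
-- inner loop body of A: update the map at (prefix, word), then update the running prefix
def gwmStepA (s : PySem.Dict (List String) (PySem.Dict String Int) × List String)
    (word : String) : PySem.Dict (List String) (PySem.Dict String Int) × List String :=
  let m := if s.1.contains s.2 then s.1 else s.1.insert s.2 PySem.Dict.empty
  let inner := m.getD s.2 PySem.Dict.empty
  let inner' := if inner.contains word then inner.insert word (inner.getD word 0 + 1)
                else inner.insert word 1
  let m' := m.insert s.2 inner'
  let prefix' := if s.2.length = 0 then [word]
                 else if s.2.length = 1 then [PySem.List.pyGetD s.2 0 "", word]
                 else [PySem.List.pyGetD s.2 1 "", word]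
  (m', prefix')

def generate_word_map (tweets : List String) : List (List String × List (String × Int)) :=
  let init : PySem.Dict (List String) (PySem.Dict String Int) :=
    PySem.Dict.empty.insert [] PySem.Dict.empty
  let m := tweets.foldl (fun m tweet => ((PySem.Str.split₀ tweet).foldl gwmStepA (m, [])).1) init
  m.items.map (fun p => (p.1, p.2.items))

-- ===== PORT B =====
-- phase 1 per tweet: the (prefix, word) transitions, prefix = words[max(0,i-2):i]
def gwmTrans (ws : List String) : List (List String × String) :=
  (PySem.List.pyRange 0 ws.length 1).map
    (fun i => (PySem.List.slice ws (some (max 0 (i - 2))) (some i), PySem.List.pyGetD ws i ""))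

-- phase 2 step: word_map.setdefault(prefix, {}); inner[word] = inner.get(word, 0) + 1
def gwmUpd (m : PySem.Dict (List String) (PySem.Dict String Int))
    (pw : List String × String) : PySem.Dict (List String) (PySem.Dict String Int) :=
  let m' := m.setdefault pw.1 PySem.Dict.empty
  let inner := m'.getD pw.1 PySem.Dict.empty
  m'.insert pw.1 (inner.insert pw.2 (inner.getD pw.2 0 + 1))

def generate_word_map_alt (tweets : List String) : List (List String × List (String × Int)) :=
  let transitions := tweets.foldl (fun acc tweet => acc ++ gwmTrans (PySem.Str.split₀ tweet)) []
  let m := transitions.foldl gwmUpd (PySem.Dict.empty.insert [] PySem.Dict.empty)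
  m.items.map (fun p => (p.1, p.2.items))

-- ===== PRECONDITION & SPEC =====
def Spec_generate_word_map (tweets : List String) (out : List (List String × List (String × Int))) : Prop := out = generate_word_map_alt tweets
instance (tweets : List String) (out : List (List String × List (String × Int))) : Decidable (Spec_generate_word_map tweets out) := by unfold Spec_generate_word_map; infer_instance

-- ===== CLAIM (what is proved, stated in full; the proofs are below) =====
def Claim_equal_generate_word_map : Prop := ∀ (tweets : List String), Dom_generate_word_map tweets → Spec_generate_word_map tweets (generate_word_map tweets)

-- ===== LEMMAS AND PROOFS =====

-- A's running-prefix update, as a function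
def gwmNext (p : List String) (w : String) : List String :=
  if p.length = 0 then [w]
  else if p.length = 1 then [PySem.List.pyGetD p 0 "", w]
  else [PySem.List.pyGetD p 1 "", w]

-- the sequence of (prefix, word) pairs A's inner loop processes, starting from prefix p
def gwmPairs (p : List String) (ws : List String) : List (List String × String) :=
  match ws with
  | [] => []
  | w :: rest => (p, w) :: gwmPairs (gwmNext p w) rest

-- prefix slice at index j, in Nat form
def gwmPrefixAt (ws : List String) (j : Nat) : List String :=
  (ws.drop (j - 2)).take (j - (j - 2))

-- (ws.drop k).take 2 = the two words at k, k+1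
lemma gwmTakeTwoDrop (ws : List String) (k : Nat) (h : k + 1 < ws.length) :
    (ws.drop k).take 2 = [ws[k], ws[k + 1]] := by
  rw [List.drop_eq_getElem_cons (by omega : k < ws.length),
      List.drop_eq_getElem_cons (by omega : k + 1 < ws.length)]
  simp only [List.take_succ_cons, List.take_zero]

lemma gwmStepA_eq (m : PySem.Dict (List String) (PySem.Dict String Int))
    (p : List String) (w : String) :
    gwmStepA (m, p) w = (gwmUpd m (p, w), gwmNext p w) := by
  have hm : (if m.contains p = true then m else m.insert p PySem.Dict.empty)
      = m.setdefault p PySem.Dict.empty := by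
    by_cases hc : m.contains p = true
    · simp [hc, PySem.Dict.setdefault_of_contains m PySem.Dict.empty hc]
    · simp [hc, PySem.Dict.setdefault_of_not_contains m PySem.Dict.empty (by simpa using hc)]
  unfold gwmStepA gwmUpd gwmNext
  simp only [hm]
  congr 1
  by_cases hw : ((m.setdefault p PySem.Dict.empty).getD p PySem.Dict.empty).contains w = true
  · simp [hw]
  · simp [hw, PySem.Dict.getD_of_not_contains _ (0:Int) (by simpa using hw : ((m.setdefault p PySem.Dict.empty).getD p PySem.Dict.empty).contains w = false)]

lemma foldl_stepA_eq (ws : List String)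
    (m : PySem.Dict (List String) (PySem.Dict String Int)) (p : List String) :
    (ws.foldl gwmStepA (m, p)).1 = (gwmPairs p ws).foldl gwmUpd m := by
  induction ws generalizing m p with
  | nil => rfl
  | cons w rest ih =>
      simp only [List.foldl_cons, gwmPairs, gwmStepA_eq]
      exact ih _ _

lemma gwmNext_prefixAt (ws : List String) (j : Nat) (h : j < ws.length) :
    gwmNext (gwmPrefixAt ws j) (ws.getD j "") = gwmPrefixAt ws (j + 1) := by
  rw [List.getD_eq_getElem ws "" h]
  rcases j with _ | j
  · -- j = 0
    have h1 : ws.take 1 = [ws[0]] := by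
      rw [List.take_add_one, List.getElem?_eq_getElem h]; simp
    simp [gwmNext, gwmPrefixAt, h1]
  · rcases j with _ | j
    · -- j = 1
      have h2 : ws.take 2 = [ws[0], ws[1]] := gwmTakeTwoDrop ws 0 (by simpa using h)
      have h1 : ws.take 1 = [ws[0]] := by
        rw [List.take_add_one, List.getElem?_eq_getElem (by omega)]; simp
      simp [gwmNext, gwmPrefixAt, h1, h2, PySem.List.pyGetD, PySem.List.pyGet?,
        PySem.List.pyIdx?]
    · -- j + 2
      simp only [show j + 1 + 1 = j + 2 by omega]
      have hp : gwmPrefixAt ws (j + 2) = [ws[j], ws[j + 1]] := by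
        have h2 := gwmTakeTwoDrop ws j (by omega)
        unfold gwmPrefixAt
        rw [show j + 2 - 2 = j by omega, show j + 2 - j = 2 by omega]
        exact h2
      have hp' : gwmPrefixAt ws (j + 2 + 1) = [ws[j + 1], ws[j + 2]] := by
        have h2 := gwmTakeTwoDrop ws (j + 1) (by omega)
        unfold gwmPrefixAt
        rw [show j + 2 + 1 - 2 = j + 1 by omega, show j + 2 + 1 - (j + 1) = 2 by omega]
        simpa [show j + 1 + 1 = j + 2 by omega] using h2
      rw [hp, hp']
      simp [gwmNext, PySem.List.pyGetD, PySem.List.pyGet?, PySem.List.pyIdx?]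

lemma gwmPairs_range' (n j : Nat) (ws : List String) (h : j + n = ws.length) :
    gwmPairs (gwmPrefixAt ws j) (ws.drop j)
      = (List.range' j n).map (fun k => (gwmPrefixAt ws k, ws.getD k "")) := by
  induction n generalizing j with
  | zero =>
      have hj : j = ws.length := by omega
      subst hj
      simp [gwmPairs]
  | succ n ih =>
      have hj : j < ws.length := by omega
      rw [List.drop_eq_getElem_cons hj, List.range'_succ]
      simp only [gwmPairs, List.map_cons]
      have hg : ws.getD j "" = ws[j] := List.getD_eq_getElem ws "" hj
      refine congrArg₂ _ (by rw [hg]) ?_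
      rw [← hg, gwmNext_prefixAt ws j hj]
      exact ih (j + 1) (by omega)

lemma gwmTrans_eq_pairs (ws : List String) :
    gwmTrans ws = gwmPairs [] ws := by
  unfold gwmTrans
  rw [PySem.List.pyRange_zero_nat, List.map_map]
  have hmap : ∀ k : Nat,
      (PySem.List.slice ws (some (max 0 ((k : Int) - 2))) (some (k : Int)),
        PySem.List.pyGetD ws (k : Int) "")
      = (gwmPrefixAt ws k, ws.getD k "") := by
    intro k
    have e : (max 0 ((k : Int) - 2)) = ((k - 2 : Nat) : Int) := by
      omega
    rw [e, PySem.List.slice_natCast, PySem.List.pyGetD_natCast]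
    rfl
  have hfun : ((fun i => (PySem.List.slice ws (some (max 0 (i - 2))) (some i),
        PySem.List.pyGetD ws i "")) ∘ fun k : Nat => (k : Int))
      = fun k : Nat => (gwmPrefixAt ws k, ws.getD k "") := by
    funext k; exact hmap k
  rw [hfun]
  have := gwmPairs_range' ws.length 0 ws (by omega)
  simpa [gwmPrefixAt, List.range_eq_range'] using this.symm

-- ===== VERDICT (by name: the statement is the Claim_ definition above) =====
-- outer loops: A's per-tweet fold equals B's fold over the flattened transitions
lemma gwmFold_tweets (tweets : List String)
    (m : PySem.Dict (List String) (PySem.Dict String Int)) :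
    tweets.foldl (fun m tweet => ((PySem.Str.split₀ tweet).foldl gwmStepA (m, [])).1) m
      = (tweets.flatMap (fun t => gwmTrans (PySem.Str.split₀ t))).foldl gwmUpd m := by
  induction tweets generalizing m with
  | nil => rfl
  | cons t rest ih =>
      simp only [List.foldl_cons, List.flatMap_cons, List.foldl_append]
      rw [foldl_stepA_eq, ← gwmTrans_eq_pairs]
      exact ih _

theorem generate_word_map_spec : Claim_equal_generate_word_map := by
  intro tweets _
  show generate_word_map tweets = generate_word_map_alt tweets
  simp only [generate_word_map, generate_word_map_alt,
    PySem.List.foldl_append_eq_flatMap, List.nil_append, gwmFold_tweets]
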